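-- pv_equiv track=rewrite | github.com/inyukwo1/qgm_decoder | sqlparser/process_sql.py | get_quote_idxs
-- ===== SOURCE A (Python) =====
-- def in_quote(sent, quotes):
--     quote = None
--     mark = ""
--     prev_char = ""
--     for c in sent:
--         if c in quotes:
--             if c == quote and prev_char != "\\":
--                 quote = None
--             elif quote is None and prev_char != "\\":
--                 quote = c
--         if quote is None:
--             mark += "0"
--         else:
--             mark += "1"
--         prev_char = c
--     return mark
--
-- def get_quote_idxs(string, quotes="\"'"):
--     quote_marks = in_quote(string, quotes)
--     prev_char = "0"
--     idxs = []
--     for idx, char in enumerate(quote_marks):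
--         if char == "1" and prev_char == "0":
--             idxs.append(idx)
--         if char == "0" and prev_char == "1":
--             idxs.append(idx)
--         prev_char = char
--     return idxs
-- ===== SOURCE B (Python) =====
-- def get_quote_idxs(string, quotes="\"'"):
--     quote = None
--     prev_char = ""
--     inside = False
--     idxs = []
--     for idx, c in enumerate(string):
--         if c in quotes:
--             if c == quote and prev_char != "\\":
--                 quote = None
--             elif quote is None and prev_char != "\\":
--                 quote = c
--         cur = quote is not None
--         if cur != inside:
--             idxs.append(idx)
--         inside = cur
--         prev_char = c
--     return idxs
-- ===== Notes on version B (the rewrite author's own statement) =====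
-- stated objective: simpler
-- what changed: Collapses A's two passes (build a '0'/'1' mark string, then scan it for transitions) into one loop over the string that tracks the quote state and an inside flag and records an index whenever the flag flips; the intermediate mark string is never built.
import Mathlib
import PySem

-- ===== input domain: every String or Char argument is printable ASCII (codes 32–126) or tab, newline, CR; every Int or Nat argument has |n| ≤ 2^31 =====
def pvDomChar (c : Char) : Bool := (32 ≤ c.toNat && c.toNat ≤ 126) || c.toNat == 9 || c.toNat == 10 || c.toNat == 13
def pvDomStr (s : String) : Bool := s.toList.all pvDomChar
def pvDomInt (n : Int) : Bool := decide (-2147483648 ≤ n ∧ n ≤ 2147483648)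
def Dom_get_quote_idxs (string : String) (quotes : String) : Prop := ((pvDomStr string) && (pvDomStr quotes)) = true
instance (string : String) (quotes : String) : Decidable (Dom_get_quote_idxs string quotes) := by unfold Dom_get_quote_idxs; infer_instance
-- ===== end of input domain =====

-- B replaces A's two passes (mark string, then transition scan) by one loop tracking the quote
-- state and an 'inside' flag; same return value, chosen for simplicity (no intermediate string).

-- ===== PORT A =====
-- prev_char is "" initially and a single char afterwards: ported as Option Char (none = "");
-- 'c in quotes' for a single char c is exactly list membership of c in quotes' characters.
def in_quote (sent : String) (quotes : String) : List Char :=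
  (sent.toList.foldl
    (fun (st : Option Char × List Char × Option Char) (c : Char) =>
      let quote :=
        if quotes.toList.contains c then
          if st.1 = some c ∧ st.2.2 ≠ some '\\' then none
          else if st.1 = none ∧ st.2.2 ≠ some '\\' then some c
          else st.1
        else st.1
      (quote, st.2.1 ++ [if quote = none then '0' else '1'], some c))
    (none, [], none)).2.1

def get_quote_idxs (string : String) (quotes : String) : List Int :=
  let quote_marks := in_quote string quotes
  ((PySem.List.enumerate quote_marks 0).foldl
    (fun (st : Char × List Int) (p : Int × Char) =>
      let idxs := if p.2 = '1' ∧ st.1 = '0' then st.2 ++ [p.1] else st.2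
      let idxs := if p.2 = '0' ∧ st.1 = '1' then idxs ++ [p.1] else idxs
      (p.2, idxs))
    ('0', [])).2

-- ===== PORT B =====
def get_quote_idxs_alt (string : String) (quotes : String) : List Int :=
  ((PySem.List.enumerate string.toList 0).foldl
    (fun (st : Option Char × Option Char × Bool × List Int) (p : Int × Char) =>
      let quote :=
        if quotes.toList.contains p.2 then
          if st.1 = some p.2 ∧ st.2.1 ≠ some '\\' then none
          else if st.1 = none ∧ st.2.1 ≠ some '\\' then some p.2
          else st.1
        else st.1
      let cur := quote.isSome
      let idxs := if cur ≠ st.2.2.1 then st.2.2.2 ++ [p.1] else st.2.2.2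
      (quote, some p.2, cur, idxs))
    (none, none, false, [])).2.2.2

-- ===== PRECONDITION & SPEC =====
def Spec_get_quote_idxs (string : String) (quotes : String) (out : List Int) : Prop := out = get_quote_idxs_alt string quotes
instance (string : String) (quotes : String) (out : List Int) : Decidable (Spec_get_quote_idxs string quotes out) := by unfold Spec_get_quote_idxs; infer_instance

-- ===== CLAIM (what is proved, stated in full; the proofs are below) =====
def Claim_equal_get_quote_idxs : Prop := ∀ (string : String) (quotes : String), Dom_get_quote_idxs string quotes → Spec_get_quote_idxs string quotes (get_quote_idxs string quotes)

-- ===== LEMMAS AND PROOFS =====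

-- the quote-state update both programs perform on one character
def pvUpd (quotes : List Char) (q prev : Option Char) (c : Char) : Option Char :=
  if quotes.contains c then
    if q = some c ∧ prev ≠ some '\\' then none
    else if q = none ∧ prev ≠ some '\\' then some c
    else q
  else q

-- the mark characters A's first pass produces from state (q, prev)
def pvMarks (quotes : List Char) (q prev : Option Char) : List Char → List Char
  | [] => []
  | c :: cs =>
    (if pvUpd quotes q prev c = none then '0' else '1') ::
      pvMarks quotes (pvUpd quotes q prev c) (some c) cs

-- the transition indices, as a recursion over the remaining characters
def pvIdxs (quotes : List Char) (q prev : Option Char) (inside : Bool) (n : Int) : List Char → List Int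
  | [] => []
  | c :: cs =>
    (if (pvUpd quotes q prev c).isSome ≠ inside then [n] else []) ++
      pvIdxs quotes (pvUpd quotes q prev c) (some c) (pvUpd quotes q prev c).isSome (n + 1) cs

lemma in_quote_fold (quotes : List Char) :
    ∀ (cs : List Char) (q prev : Option Char) (m : List Char),
    (cs.foldl
      (fun (st : Option Char × List Char × Option Char) (c : Char) =>
        let quote :=
          if quotes.contains c then
            if st.1 = some c ∧ st.2.2 ≠ some '\\' then none
            else if st.1 = none ∧ st.2.2 ≠ some '\\' then some c
            else st.1
          else st.1
        (quote, st.2.1 ++ [if quote = none then '0' else '1'], some c))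
      (q, m, prev)).2.1 = m ++ pvMarks quotes q prev cs := by
  intro cs
  induction cs with
  | nil => intro q prev m; simp [pvMarks]
  | cons c cs ih =>
    intro q prev m
    simp only [List.foldl_cons, pvMarks]
    rw [show (if quotes.contains c then
            if q = some c ∧ prev ≠ some '\\' then none
            else if q = none ∧ prev ≠ some '\\' then some c
            else q
          else q) = pvUpd quotes q prev c from rfl]
    rw [ih]
    simp [List.append_assoc]

lemma second_pass (quotes : List Char) :
    ∀ (cs : List Char) (q prev : Option Char) (inside : Bool) (n : Int) (acc : List Int)
      (pm : Char), pm = (if inside then '1' else '0') →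
    ((PySem.List.enumerate (pvMarks quotes q prev cs) n).foldl
      (fun (st : Char × List Int) (p : Int × Char) =>
        let idxs := if p.2 = '1' ∧ st.1 = '0' then st.2 ++ [p.1] else st.2
        let idxs := if p.2 = '0' ∧ st.1 = '1' then idxs ++ [p.1] else idxs
        (p.2, idxs))
      (pm, acc)).2
    = acc ++ pvIdxs quotes q prev inside n cs := by
  intro cs
  induction cs with
  | nil => intro q prev inside n acc pm hpm; simp [pvMarks, pvIdxs, PySem.List.enumerate_nil]
  | cons c cs ih =>
    intro q prev inside n acc pm hpm
    subst hpm
    rw [show pvMarks quotes q prev (c :: cs)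
          = (if pvUpd quotes q prev c = none then '0' else '1')
            :: pvMarks quotes (pvUpd quotes q prev c) (some c) cs from rfl]
    cases hq : (pvUpd quotes q prev c) with
    | none =>
      rw [PySem.List.enumerate_cons, List.foldl_cons]
      cases inside with
      | false =>
        show (List.foldl _ ('0', acc)
          (PySem.List.enumerate (pvMarks quotes none (some c) cs) (n + 1))).2 = _
        rw [ih none (some c) false (n + 1) acc '0' rfl]
        simp [pvIdxs, hq]
      | true =>
        show (List.foldl _ ('0', acc ++ [n])
          (PySem.List.enumerate (pvMarks quotes none (some c) cs) (n + 1))).2 = _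
        rw [ih none (some c) false (n + 1) (acc ++ [n]) '0' rfl]
        simp [pvIdxs, hq, List.append_assoc]
    | some x =>
      rw [PySem.List.enumerate_cons, List.foldl_cons]
      cases inside with
      | false =>
        show (List.foldl _ ('1', acc ++ [n])
          (PySem.List.enumerate (pvMarks quotes (some x) (some c) cs) (n + 1))).2 = _
        rw [ih (some x) (some c) true (n + 1) (acc ++ [n]) '1' rfl]
        simp [pvIdxs, hq, List.append_assoc]
      | true =>
        show (List.foldl _ ('1', acc)
          (PySem.List.enumerate (pvMarks quotes (some x) (some c) cs) (n + 1))).2 = _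
        rw [ih (some x) (some c) true (n + 1) acc '1' rfl]
        simp [pvIdxs, hq]

lemma alt_fold (quotes : List Char) :
    ∀ (cs : List Char) (q prev : Option Char) (inside : Bool) (n : Int) (acc : List Int),
    ((PySem.List.enumerate cs n).foldl
      (fun (st : Option Char × Option Char × Bool × List Int) (p : Int × Char) =>
        let quote :=
          if quotes.contains p.2 then
            if st.1 = some p.2 ∧ st.2.1 ≠ some '\\' then none
            else if st.1 = none ∧ st.2.1 ≠ some '\\' then some p.2
            else st.1
          else st.1
        let cur := quote.isSome
        let idxs := if cur ≠ st.2.2.1 then st.2.2.2 ++ [p.1] else st.2.2.2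
        (quote, some p.2, cur, idxs))
      (q, prev, inside, acc)).2.2.2
    = acc ++ pvIdxs quotes q prev inside n cs := by
  intro cs
  induction cs with
  | nil => intro q prev inside n acc; simp [pvIdxs, PySem.List.enumerate_nil]
  | cons c cs ih =>
    intro q prev inside n acc
    simp only [PySem.List.enumerate_cons, List.foldl_cons]
    show (List.foldl _
      (pvUpd quotes q prev c, some c, (pvUpd quotes q prev c).isSome,
        if (pvUpd quotes q prev c).isSome ≠ inside then acc ++ [n] else acc)
      (PySem.List.enumerate cs (n + 1))).2.2.2 = _
    rw [ih (pvUpd quotes q prev c) (some c) (pvUpd quotes q prev c).isSome (n + 1)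
      (if (pvUpd quotes q prev c).isSome ≠ inside then acc ++ [n] else acc)]
    simp only [pvIdxs]
    by_cases h : (pvUpd quotes q prev c).isSome ≠ inside <;>
      simp [h, List.append_assoc]

lemma a_eq (string quotes : String) :
    get_quote_idxs string quotes = [] ++ pvIdxs quotes.toList none none false 0 string.toList := by
  have hm : in_quote string quotes = pvMarks quotes.toList none none string.toList := by
    unfold in_quote
    simpa using in_quote_fold quotes.toList string.toList none none []
  unfold get_quote_idxs
  rw [hm]
  exact second_pass quotes.toList string.toList none none false 0 [] '0' rfl

lemma b_eq (string quotes : String) :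
    get_quote_idxs_alt string quotes = [] ++ pvIdxs quotes.toList none none false 0 string.toList := by
  unfold get_quote_idxs_alt
  exact alt_fold quotes.toList string.toList none none false 0 []

-- ===== VERDICT (by name: the statement is the Claim_ definition above) =====
theorem get_quote_idxs_spec : Claim_equal_get_quote_idxs := by
  intro string quotes _
  unfold Spec_get_quote_idxs
  rw [a_eq, b_eq]
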